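-- pv_equiv track=rewrite | github.com/SilentSpiral/simple_Elgamal | Elgamal_64bit_7-16.py | EncryptedDiv
-- ===== SOURCE A (Python) =====
-- def EncryptedDiv(A):
-- 	C1 = []
-- 	C2 = []
-- 	r=len(A)//16
-- 	for i in range(r):
-- 		C1.append((A[0]<<0x38)+(A[1]<<0x30)+(A[2]<<0x28)+(A[3]<<0x20)+(A[4]<<0x18)+(A[5]<<0x10)+(A[6]<<0x8)+A[7])
-- 		C2.append((A[8]<<0x38)+(A[9]<<0x30)+(A[10]<<0x28)+(A[11]<<0x20)+(A[12]<<0x18)+(A[13]<<0x10)+(A[14]<<0x8)+A[15])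
-- 		A = A[16:]
-- 	return (C1,C2,r)
-- ===== SOURCE B (Python) =====
-- def EncryptedDiv(A):
-- 	r = len(A)//16
-- 	C1 = []
-- 	C2 = []
-- 	for i in range(r):
-- 		base = i*16
-- 		c1 = 0
-- 		for b in A[base:base+8]:
-- 			c1 = (c1<<8)+b
-- 		c2 = 0
-- 		for b in A[base+8:base+16]:
-- 			c2 = (c2<<8)+b
-- 		C1.append(c1)
-- 		C2.append(c2)
-- 	return (C1,C2,r)
-- ===== Notes on version B (the rewrite author's own statement) =====
-- stated objective: alternative
-- what changed: B iterates over chunk indices with an offset base=i*16 and computes each 64-bit value by an accumulator fold (c<<8)+b over the chunk's byte slice, instead of A's unrolled eight-term shift expression combined with repeatedly reslicing the list from the front.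
import Mathlib
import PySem

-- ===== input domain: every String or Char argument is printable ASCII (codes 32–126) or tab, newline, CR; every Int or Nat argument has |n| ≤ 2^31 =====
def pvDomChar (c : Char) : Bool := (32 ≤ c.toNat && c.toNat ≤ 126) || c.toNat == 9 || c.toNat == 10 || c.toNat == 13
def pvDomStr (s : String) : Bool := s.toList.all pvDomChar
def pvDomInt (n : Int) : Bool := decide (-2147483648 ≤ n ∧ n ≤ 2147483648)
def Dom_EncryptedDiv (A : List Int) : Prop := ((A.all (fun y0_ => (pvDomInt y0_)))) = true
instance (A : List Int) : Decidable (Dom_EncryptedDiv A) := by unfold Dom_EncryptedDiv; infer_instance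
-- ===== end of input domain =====

-- B replaces A's front-reslicing loop (A = A[16:], unrolled eight-term shift sums) by indexing
-- chunks at offset base = i*16 and folding (c<<8)+b over each 8-byte slice; measurably faster (A's
-- reslicing recopies the remaining list each iteration). Return value only; neither mutates its argument.

-- ===== PORT A =====
-- Python '<<' on int is Lean's '<<<' on Int (exact); range(r) is pyRange; A[16:] is slice; the loop
-- body is the helper EncryptedDivStep over the loop state (A, C1, C2), its Int argument the unused i.
def EncryptedDivStep (st : List Int × List Int × List Int) (_i : Int) :
    List Int × List Int × List Int :=
  let A := st.1
  let c1 := PySem.List.pyGetD A 0 0 <<< (56:Nat) + PySem.List.pyGetD A 1 0 <<< (48:Nat) +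
            PySem.List.pyGetD A 2 0 <<< (40:Nat) + PySem.List.pyGetD A 3 0 <<< (32:Nat) +
            PySem.List.pyGetD A 4 0 <<< (24:Nat) + PySem.List.pyGetD A 5 0 <<< (16:Nat) +
            PySem.List.pyGetD A 6 0 <<< (8:Nat) + PySem.List.pyGetD A 7 0
  let c2 := PySem.List.pyGetD A 8 0 <<< (56:Nat) + PySem.List.pyGetD A 9 0 <<< (48:Nat) +
            PySem.List.pyGetD A 10 0 <<< (40:Nat) + PySem.List.pyGetD A 11 0 <<< (32:Nat) +
            PySem.List.pyGetD A 12 0 <<< (24:Nat) + PySem.List.pyGetD A 13 0 <<< (16:Nat) +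
            PySem.List.pyGetD A 14 0 <<< (8:Nat) + PySem.List.pyGetD A 15 0
  (PySem.List.slice A (some 16) none, st.2.1 ++ [c1], st.2.2 ++ [c2])

def EncryptedDiv (A : List Int) : List Int × List Int × Int :=
  let r : Int := PySem.Int.floordiv (A.length : Int) 16
  let st := (PySem.List.pyRange 0 r 1).foldl EncryptedDivStep (A, [], [])
  (st.2.1, st.2.2, r)

-- ===== PORT B =====
-- the inner 'for b in A[base:base+8]: c = (c<<8)+b' accumulator loop of Source B
def EncryptedDivAltWord (xs : List Int) : Int :=
  xs.foldl (fun (a : Int) b => a <<< (8 : Nat) + b) 0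

-- the body of Source B's loop over chunk indices i, state (C1, C2)
def EncryptedDivAltStep (A : List Int) (st : List Int × List Int) (i : Int) :
    List Int × List Int :=
  let base := i * 16
  (st.1 ++ [EncryptedDivAltWord (PySem.List.slice A (some base) (some (base + 8)))],
   st.2 ++ [EncryptedDivAltWord (PySem.List.slice A (some (base + 8)) (some (base + 16)))])

def EncryptedDiv_alt (A : List Int) : List Int × List Int × Int :=
  let r : Int := PySem.Int.floordiv (A.length : Int) 16
  let st := (PySem.List.pyRange 0 r 1).foldl (EncryptedDivAltStep A) ([], [])
  (st.1, st.2, r)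

-- ===== PRECONDITION & SPEC =====
def Spec_EncryptedDiv (A : List Int) (out : List Int × List Int × Int) : Prop := out = EncryptedDiv_alt A
instance (A : List Int) (out : List Int × List Int × Int) : Decidable (Spec_EncryptedDiv A out) := by unfold Spec_EncryptedDiv; infer_instance

-- ===== CLAIM (what is proved, stated in full; the proofs are below) =====
def Claim_equal_EncryptedDiv : Prop := ∀ (A : List Int), Dom_EncryptedDiv A → Spec_EncryptedDiv A (EncryptedDiv A)

-- ===== LEMMAS AND PROOFS =====

-- A's fold leaves A.drop (16*n) and appends, per step i, the two unrolled words of A.drop (16*i)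
lemma foldA (A : List Int) (n : Nat) :
    (List.range n).foldl (fun st (k : Nat) => EncryptedDivStep st (k : Int)) (A, [], []) =
      (A.drop (16 * n),
       (List.range n).map (fun i => (EncryptedDivStep (A.drop (16 * i), [], []) 0).2.1.getD 0 0),
       (List.range n).map (fun i => (EncryptedDivStep (A.drop (16 * i), [], []) 0).2.2.getD 0 0)) := by
  induction n with
  | zero => simp
  | succ n ih =>
      rw [List.range_succ, List.foldl_append, ih]
      simp [EncryptedDivStep, Nat.mul_succ]
      rw [show ((16:Int)) = ((16:Nat) : Int) by norm_num, PySem.List.slice_from_natCast,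
          List.drop_drop]

-- B's fold appends, per step i, the two slice-fold words at base 16*i
lemma foldB (A : List Int) (n : Nat) :
    (List.range n).foldl (fun st (k : Nat) => EncryptedDivAltStep A st (k : Int)) ([], []) =
      ((List.range n).map (fun (i : Nat) => (EncryptedDivAltStep A ([], []) (i : Int)).1.getD 0 0),
       (List.range n).map (fun (i : Nat) => (EncryptedDivAltStep A ([], []) (i : Int)).2.getD 0 0)) := by
  induction n with
  | zero => simp
  | succ n ih =>
      rw [List.range_succ, List.foldl_append, ih]
      simp [EncryptedDivAltStep]

-- on a chunk of ≥ 16 remaining bytes, the unrolled shift sums equal the accumulator folds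
lemma chunk (xs : List Int) (h : 16 ≤ xs.length) :
    (EncryptedDivAltWord (xs.take 8) =
      PySem.List.pyGetD xs 0 0 <<< (56:Nat) + PySem.List.pyGetD xs 1 0 <<< (48:Nat) +
      PySem.List.pyGetD xs 2 0 <<< (40:Nat) + PySem.List.pyGetD xs 3 0 <<< (32:Nat) +
      PySem.List.pyGetD xs 4 0 <<< (24:Nat) + PySem.List.pyGetD xs 5 0 <<< (16:Nat) +
      PySem.List.pyGetD xs 6 0 <<< (8:Nat) + PySem.List.pyGetD xs 7 0) ∧
    (EncryptedDivAltWord ((xs.drop 8).take 8) =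
      PySem.List.pyGetD xs 8 0 <<< (56:Nat) + PySem.List.pyGetD xs 9 0 <<< (48:Nat) +
      PySem.List.pyGetD xs 10 0 <<< (40:Nat) + PySem.List.pyGetD xs 11 0 <<< (32:Nat) +
      PySem.List.pyGetD xs 12 0 <<< (24:Nat) + PySem.List.pyGetD xs 13 0 <<< (16:Nat) +
      PySem.List.pyGetD xs 14 0 <<< (8:Nat) + PySem.List.pyGetD xs 15 0) := by
  rcases xs with _ | ⟨a0, xs⟩; · simp at h
  rcases xs with _ | ⟨a1, xs⟩; · simp at h
  rcases xs with _ | ⟨a2, xs⟩; · simp at h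
  rcases xs with _ | ⟨a3, xs⟩; · simp at h
  rcases xs with _ | ⟨a4, xs⟩; · simp at h
  rcases xs with _ | ⟨a5, xs⟩; · simp at h
  rcases xs with _ | ⟨a6, xs⟩; · simp at h
  rcases xs with _ | ⟨a7, xs⟩; · simp at h
  rcases xs with _ | ⟨a8, xs⟩; · simp at h
  rcases xs with _ | ⟨a9, xs⟩; · simp at h
  rcases xs with _ | ⟨a10, xs⟩; · simp at h
  rcases xs with _ | ⟨a11, xs⟩; · simp at h
  rcases xs with _ | ⟨a12, xs⟩; · simp at h
  rcases xs with _ | ⟨a13, xs⟩; · simp at h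
  rcases xs with _ | ⟨a14, xs⟩; · simp at h
  rcases xs with _ | ⟨a15, xs⟩; · simp at h
  constructor <;>
    · simp only [EncryptedDivAltWord, PySem.List.pyGetD_ofNat',
        List.getD_cons_succ, List.getD_cons_zero, List.take_succ_cons, List.take_zero,
        List.drop_succ_cons, List.drop_zero, List.foldl_cons, List.foldl_nil, Int.shiftLeft_eq]
      ring

-- ===== VERDICT (by name: the statement is the Claim_ definition above) =====
theorem EncryptedDiv_spec : Claim_equal_EncryptedDiv := by
  intro A _
  unfold Spec_EncryptedDiv
  have hr : PySem.Int.floordiv (A.length : Int) 16 = ((A.length / 16 : Nat) : Int) := by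
    exact_mod_cast PySem.Int.floordiv_natCast A.length 16
  have hA : (PySem.List.pyRange 0 ((A.length / 16 : Nat) : Int) 1).foldl
      EncryptedDivStep (A, [], []) =
      (A.drop (16 * (A.length / 16)),
       (List.range (A.length / 16)).map
         (fun i => (EncryptedDivStep (A.drop (16 * i), [], []) 0).2.1.getD 0 0),
       (List.range (A.length / 16)).map
         (fun i => (EncryptedDivStep (A.drop (16 * i), [], []) 0).2.2.getD 0 0)) := by
    rw [PySem.List.pyRange_zero_natCast, List.foldl_map]
    exact foldA A _
  have hB : (PySem.List.pyRange 0 ((A.length / 16 : Nat) : Int) 1).foldl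
      (EncryptedDivAltStep A) ([], []) =
      ((List.range (A.length / 16)).map
         (fun (i : Nat) => (EncryptedDivAltStep A ([], []) (i : Int)).1.getD 0 0),
       (List.range (A.length / 16)).map
         (fun (i : Nat) => (EncryptedDivAltStep A ([], []) (i : Int)).2.getD 0 0)) := by
    rw [PySem.List.pyRange_zero_natCast, List.foldl_map]
    exact foldB A _
  simp only [EncryptedDiv, EncryptedDiv_alt, hr, hA, hB, Prod.mk.injEq]
  refine ⟨?_, ?_, trivial⟩
  · apply List.map_congr_left
    intro i hi
    have hi' : i < A.length / 16 := List.mem_range.mp hi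
    have hlen : 16 ≤ (A.drop (16 * i)).length := by
      simp [List.length_drop]; omega
    have h8 : ((i : Int) * 16 + 8) = (((16 * i + 8 : Nat)) : Int) := by push_cast; ring
    have hb : ((i : Int) * 16) = (((16 * i : Nat)) : Int) := by push_cast; ring
    simp only [EncryptedDivStep, EncryptedDivAltStep, List.nil_append,
      List.getD_cons_zero]
    rw [h8, hb, PySem.List.slice_natCast, Nat.add_sub_cancel_left, (chunk _ hlen).1]
  · apply List.map_congr_left
    intro i hi
    have hi' : i < A.length / 16 := List.mem_range.mp hi
    have hlen : 16 ≤ (A.drop (16 * i)).length := by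
      simp [List.length_drop]; omega
    have h8 : ((i : Int) * 16 + 8) = (((16 * i + 8 : Nat)) : Int) := by push_cast; ring
    have h16 : ((i : Int) * 16 + 16) = (((16 * i + 16 : Nat)) : Int) := by push_cast; ring
    simp only [EncryptedDivStep, EncryptedDivAltStep, List.nil_append,
      List.getD_cons_zero]
    rw [h8, h16, PySem.List.slice_natCast,
      show (16 * i + 16) - (16 * i + 8) = 8 by omega,
      show (16 * i + 8 : Nat) = 16 * i + 8 by rfl, ← List.drop_drop,
      (chunk _ hlen).2]
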